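-- pv_equiv track=rewrite | github.com/HustleDanie/LLM_FineTuning_Masterclass | 20_retrieval_augmented_fine_tuning/raft_from_scratch.py | recursive_chunking
-- ===== SOURCE A (Python) =====
-- from typing import Dict, List, Tuple, Optional
--
-- def recursive_chunking(
--     text: str,
--     max_chunk_size: int = 512,
--     min_chunk_size: int = 100
-- ) -> List[Dict]:
--     """
--     Recursively split text: first by sections, then paragraphs,
--     then sentences, until chunks are within size limits.
--     """
--     # Level 1: Try section splits
--     separators = ["\n\n\n", "\n\n", "\n", ". "]
--
--     chunks = []
--
--     def split_recursive(text_piece, level=0):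
--         if len(text_piece) <= max_chunk_size:
--             if len(text_piece) >= min_chunk_size:
--                 chunks.append({"text": text_piece.strip(), "chunk_type": "recursive"})
--             return
--
--         if level >= len(separators):
--             # Force split at max_chunk_size
--             chunks.append({
--                 "text": text_piece[:max_chunk_size].strip(),
--                 "chunk_type": "recursive_forced"
--             })
--             if len(text_piece) > max_chunk_size:
--                 split_recursive(text_piece[max_chunk_size:], level)
--             return
--
--         parts = text_piece.split(separators[level])
--         for part in parts:
--             if part.strip():
--                 split_recursive(part, level + 1)
--
--     split_recursive(text)
--     return chunks
-- ===== SOURCE B (Python) =====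
-- def recursive_chunking(text, max_chunk_size=512, min_chunk_size=100):
--     """Staged pipeline re-implementation: four level-by-level expansion passes
--     over a flat item list (finished chunks pass through, oversized pieces are
--     split by that level's separator), then one final pass that force-chops
--     whatever is still too big. No recursion, no stack."""
--     if max_chunk_size <= 0:
--         raise ValueError("max_chunk_size must be positive")
--     items = [("pending", text)]
--     for sep in ["\n\n\n", "\n\n", "\n", ". "]:
--         nxt = []
--         for kind, val in items:
--             if kind == "final":
--                 nxt.append((kind, val))
--             elif len(val) <= max_chunk_size:
--                 if len(val) >= min_chunk_size:
--                     nxt.append(("final", {"text": val.strip(),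
--                                           "chunk_type": "recursive"}))
--             else:
--                 nxt.extend(("pending", part) for part in val.split(sep)
--                            if part.strip())
--         items = nxt
--     chunks = []
--     for kind, val in items:
--         if kind == "final":
--             chunks.append(val)
--             continue
--         while len(val) > max_chunk_size:
--             chunks.append({"text": val[:max_chunk_size].strip(),
--                            "chunk_type": "recursive_forced"})
--             val = val[max_chunk_size:]
--         if len(val) >= min_chunk_size:
--             chunks.append({"text": val.strip(), "chunk_type": "recursive"})
--     return chunks
-- ===== Notes on version B (the rewrite author's own statement) =====
-- stated objective: alternative
-- what changed: The nested recursive splitter mutating a shared chunks list is replaced by a staged pipeline: four level-by-level expansion passes over a flat list of final/pending items, then one final pass that force-chops the still-oversized pieces.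
-- outside the precondition, e.g. on recursive_chunking('', 0, 0): A returns [{'text': '', 'chunk_type': 'recursive'}], B raises ValueError; on recursive_chunking(' \n ', -3, -5): A returns [], B raises ValueError
import Mathlib
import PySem

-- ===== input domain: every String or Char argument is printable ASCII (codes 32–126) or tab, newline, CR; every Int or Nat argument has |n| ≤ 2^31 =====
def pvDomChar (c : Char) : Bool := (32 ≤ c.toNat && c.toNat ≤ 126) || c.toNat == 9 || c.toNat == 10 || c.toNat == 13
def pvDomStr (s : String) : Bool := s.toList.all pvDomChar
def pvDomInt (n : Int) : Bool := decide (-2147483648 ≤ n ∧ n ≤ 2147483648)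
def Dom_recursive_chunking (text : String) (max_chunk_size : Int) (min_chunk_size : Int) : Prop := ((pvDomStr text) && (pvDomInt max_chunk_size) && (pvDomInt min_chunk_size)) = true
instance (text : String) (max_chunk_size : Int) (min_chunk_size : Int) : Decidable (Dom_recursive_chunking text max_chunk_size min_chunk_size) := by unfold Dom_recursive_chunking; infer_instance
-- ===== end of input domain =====

-- B replaces A's depth-first recursion (mutating a shared chunks list) by a staged pipeline:
-- four level-by-level expansion passes over a flat item list, then one force-chopping pass.

-- ===== PORT A =====
-- separators = ["\n\n\n", "\n\n", "\n", ". "]  (shared literal constant of both versions)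
def pvSeps : List (List Char) := [['\n','\n','\n'], ['\n','\n'], ['\n'], ['.',' ']]

-- split_recursive(text_piece, level): the returned list is A's appends to `chunks`, in order.
-- The Nat fuel only makes the Lean function total: Python A recurses without progress (and hits
-- the recursion limit) when max_chunk_size ≤ 0; under Pre_ the fuel never runs out (proved below).
def pvSplitA (mx mn : Int) : Nat → List Char → Nat → List (List (String × String))
  | 0, _, _ => []
  | f+1, p, level =>
    if (p.length : Int) ≤ mx then
      (if mn ≤ (p.length : Int) then
        [[("text", String.ofList (PySem.Chars.strip p)), ("chunk_type", "recursive")]]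
      else [])
    else if pvSeps.length ≤ level then
      [("text", String.ofList (PySem.Chars.strip (PySem.Chars.slice p none (some mx)))),
       ("chunk_type", "recursive_forced")] ::
        (if mx < (p.length : Int) then pvSplitA mx mn f (PySem.Chars.slice p (some mx) none) level
         else [])
    else
      (PySem.Chars.splitOn p (pvSeps.getD level [])).foldl
        (fun acc part =>
          if PySem.Chars.strip part = [] then acc
          else acc ++ pvSplitA mx mn f part (level + 1)) []

def recursive_chunking (text : String) (max_chunk_size : Int) (min_chunk_size : Int) : List (List (String × String)) :=
  pvSplitA max_chunk_size min_chunk_size (text.toList.length + 5) text.toList 0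

-- ===== PORT B =====
-- an item is either a finished chunk ("final", inl) or a still-pending text piece ("pending", inr)
def pvStep (mx mn : Int) (sep : List Char) :
    (List (String × String)) ⊕ (List Char) → List ((List (String × String)) ⊕ (List Char))
  | .inl c => [.inl c]
  | .inr p =>
    if (p.length : Int) ≤ mx then
      if mn ≤ (p.length : Int) then
        [.inl [("text", String.ofList (PySem.Chars.strip p)), ("chunk_type", "recursive")]]
      else []
    else
      (PySem.Chars.splitOn p sep).filterMap
        (fun part => if PySem.Chars.strip part = [] then none else some (.inr part))

-- one pass of the `for sep in separators:` loop
def pvStage (mx mn : Int) (sep : List Char)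
    (items : List ((List (String × String)) ⊕ (List Char))) :
    List ((List (String × String)) ⊕ (List Char)) :=
  items.flatMap (pvStep mx mn sep)

-- the final `while len(val) > max_chunk_size:` chop loop (fuel only for totality;
-- B's Python raises ValueError instead of looping forever when max_chunk_size ≤ 0)
def pvChop (mx mn : Int) : Nat → List Char → List (List (String × String))
  | 0, _ => []
  | f+1, p =>
    if (p.length : Int) ≤ mx then
      (if mn ≤ (p.length : Int) then
        [[("text", String.ofList (PySem.Chars.strip p)), ("chunk_type", "recursive")]]
      else [])
    else
      [("text", String.ofList (PySem.Chars.strip (PySem.Chars.slice p none (some mx)))),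
       ("chunk_type", "recursive_forced")] :: pvChop mx mn f (PySem.Chars.slice p (some mx) none)

-- the final collection pass
def pvCollect (mx mn : Int) (items : List ((List (String × String)) ⊕ (List Char))) :
    List (List (String × String)) :=
  items.flatMap (fun it => match it with
    | .inl c => [c]
    | .inr p => pvChop mx mn (p.length + 1) p)

def recursive_chunking_alt (text : String) (max_chunk_size : Int) (min_chunk_size : Int) : List (List (String × String)) :=
  pvCollect max_chunk_size min_chunk_size
    (pvSeps.foldl (fun its sep => pvStage max_chunk_size min_chunk_size sep its) [.inr text.toList])

-- ===== PRECONDITION & SPEC =====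
-- Pre_ excludes max_chunk_size ≤ 0: there A's forced split makes no progress, so A raises
-- RecursionError on any text whose content outgrows the bound; B validates the bound and raises
-- ValueError on all of them, including the few where A still returns a value (text that fits the
-- bound or is whitespace-only) — see the cited examples.
def Pre_recursive_chunking (text : String) (max_chunk_size : Int) (min_chunk_size : Int) : Prop :=
  1 ≤ max_chunk_size
instance (text : String) (max_chunk_size : Int) (min_chunk_size : Int) : Decidable (Pre_recursive_chunking text max_chunk_size min_chunk_size) := by unfold Pre_recursive_chunking; infer_instance

def pvWitness_recursive_chunking : String × Int × Int := ("one. two\n\nthree", 6, 1)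

def Spec_recursive_chunking (text : String) (max_chunk_size : Int) (min_chunk_size : Int) (out : List (List (String × String))) : Prop := out = recursive_chunking_alt text max_chunk_size min_chunk_size
instance (text : String) (max_chunk_size : Int) (min_chunk_size : Int) (out : List (List (String × String))) : Decidable (Spec_recursive_chunking text max_chunk_size min_chunk_size out) := by unfold Spec_recursive_chunking; infer_instance

-- ===== CLAIM (what is proved, stated in full; the proofs are below) =====
def Claim_equal_recursive_chunking : Prop := ∀ (text : String) (max_chunk_size : Int) (min_chunk_size : Int), Dom_recursive_chunking text max_chunk_size min_chunk_size → Pre_recursive_chunking text max_chunk_size min_chunk_size → Spec_recursive_chunking text max_chunk_size min_chunk_size (recursive_chunking text max_chunk_size min_chunk_size)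

-- ===== LEMMAS AND PROOFS =====

-- fuel needed by pvSplitA at (p, level)
def pvNeed (p : List Char) (level : Nat) : Nat := p.length + (5 - min level 4)

-- sum of the part lengths of splitOn is at most the original length
theorem pv_go_sum (sep : List Char) : ∀ (fuel : Nat) (l cur : List Char) (acc : List (List Char)),
    (((PySem.Chars.splitOn.go sep fuel l cur acc).map List.length).sum : Nat)
      ≤ ((acc.map List.length).sum + cur.length) + l.length := by
  intro fuel
  induction fuel with
  | zero =>
    intro l cur acc
    simp [PySem.Chars.splitOn.go]
    omega
  | succ f ih =>
    intro l cur acc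
    cases l with
    | nil => simp [PySem.Chars.splitOn.go]
    | cons c rest =>
      rw [PySem.Chars.splitOn.go]
      split
      · have := ih (List.drop sep.length (c :: rest)) [] (cur.reverse :: acc)
        simp at this ⊢
        have hd : (List.drop sep.length (c :: rest)).length ≤ rest.length + 1 := by
          simp [List.length_drop]
        omega
      · have := ih rest (c :: cur) acc
        simp at this ⊢
        omega

theorem pv_splitOn_sum (p sep : List Char) :
    ((PySem.Chars.splitOn p sep).map List.length).sum ≤ p.length := by
  have := pv_go_sum sep (p.length + 1) p [] []
  simpa [PySem.Chars.splitOn] using this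

theorem pv_splitOn_mem_len {p sep part : List Char} (h : part ∈ PySem.Chars.splitOn p sep) :
    part.length ≤ p.length :=
  le_trans (List.le_sum_of_mem (List.mem_map_of_mem h)) (pv_splitOn_sum p sep)

theorem pv_slice_len (p : List Char) (mx : Int) (hmx : 1 ≤ mx) :
    (PySem.Chars.slice p (some mx) none).length = p.length - mx.toNat := by
  rw [PySem.Chars.slice_eq_listSlice, PySem.List.slice_from p (show (0:Int) ≤ mx by omega)]
  simp

-- the chop loop is insensitive to extra fuel
theorem pv_chop_stab (mx mn : Int) (hmx : 1 ≤ mx) : ∀ (f : Nat) (p : List Char),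
    p.length + 1 ≤ f → pvChop mx mn f p = pvChop mx mn (p.length + 1) p := by
  intro f
  induction f using Nat.strong_induction_on with
  | _ f ih =>
    intro p hle
    obtain ⟨f', rfl⟩ : ∃ f', f = f' + 1 := ⟨f - 1, by omega⟩
    rw [pvChop, pvChop]
    by_cases hshort : (p.length : Int) ≤ mx
    · rw [if_pos hshort, if_pos hshort]
    · have hlen : mx.toNat < p.length := by omega
      have hslen := pv_slice_len p mx hmx
      rw [if_neg hshort, if_neg hshort,
          ih f' (by omega) _ (by omega),
          ih p.length (by omega) _ (by omega)]

-- at level ≥ 4, A's recursion is exactly B's chop loop (same fuel)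
theorem pv_chop_eq (mx mn : Int) (level : Nat) (hlev : pvSeps.length ≤ level) :
    ∀ (f : Nat) (p : List Char), pvChop mx mn f p = pvSplitA mx mn f p level := by
  intro f
  induction f with
  | zero => intro p; rfl
  | succ f ih =>
    intro p
    rw [pvChop, pvSplitA]
    by_cases hshort : (p.length : Int) ≤ mx
    · rw [if_pos hshort, if_pos hshort]
    · have hlt : mx < (p.length : Int) := by omega
      rw [if_neg hshort, if_neg hshort, if_pos hlev, if_pos hlt, ih]

-- a stage distributes over append
theorem pv_stage_append (mx mn : Int) (sep : List Char) (xs ys : List ((List (String × String)) ⊕ (List Char))) :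
    pvStage mx mn sep (xs ++ ys) = pvStage mx mn sep xs ++ pvStage mx mn sep ys := by
  simp [pvStage]

-- hence so does a whole run of stages
theorem pv_stages_append (mx mn : Int) : ∀ (S : List (List Char)) (xs ys : List ((List (String × String)) ⊕ (List Char))),
    S.foldl (fun its sep => pvStage mx mn sep its) (xs ++ ys)
      = S.foldl (fun its sep => pvStage mx mn sep its) xs
        ++ S.foldl (fun its sep => pvStage mx mn sep its) ys := by
  intro S
  induction S with
  | nil => intro xs ys; rfl
  | cons s S ih => intro xs ys; simp only [List.foldl_cons, pv_stage_append, ih]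

-- running stages item by item
theorem pv_stages_flat (mx mn : Int) (S : List (List Char)) :
    ∀ (items : List ((List (String × String)) ⊕ (List Char))),
    S.foldl (fun its sep => pvStage mx mn sep its) items
      = items.flatMap (fun it => S.foldl (fun its sep => pvStage mx mn sep its) [it]) := by
  intro items
  induction items with
  | nil =>
    induction S with
    | nil => rfl
    | cons s S ih => simpa [pvStage] using ih
  | cons it its ih =>
    have : it :: its = [it] ++ its := rfl
    rw [this, pv_stages_append, ih]
    simp

-- finished chunks pass through every stage unchanged
theorem pv_stages_final (mx mn : Int) : ∀ (S : List (List Char)) (c : List (String × String)),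
    S.foldl (fun its sep => pvStage mx mn sep its) [.inl c] = [.inl c] := by
  intro S
  induction S with
  | nil => intro c; rfl
  | cons s S ih => intro c; simpa [pvStage, pvStep] using ih c

theorem pv_stages_nil (mx mn : Int) : ∀ (S : List (List Char)),
    S.foldl (fun its sep => pvStage mx mn sep its) [] = ([] : List ((List (String × String)) ⊕ (List Char))) := by
  intro S
  induction S with
  | nil => rfl
  | cons s S ih => simpa [pvStage] using ih

theorem pv_collect_append (mx mn : Int) (xs ys : List ((List (String × String)) ⊕ (List Char))) :
    pvCollect mx mn (xs ++ ys) = pvCollect mx mn xs ++ pvCollect mx mn ys := by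
  simp [pvCollect]

-- A's recursion is insensitive to extra fuel (used for per-part fuel alignment)
theorem pv_stab (mx mn : Int) (hmx : 1 ≤ mx) : ∀ (f : Nat) (p : List Char) (level : Nat),
    pvNeed p level ≤ f → pvSplitA mx mn f p level = pvSplitA mx mn (pvNeed p level) p level := by
  intro f
  induction f using Nat.strong_induction_on with
  | _ f ih =>
    intro p level hle
    have h1 : 1 ≤ pvNeed p level := by unfold pvNeed; omega
    obtain ⟨f', rfl⟩ : ∃ f', f = f' + 1 := ⟨f - 1, by omega⟩
    obtain ⟨m, hm⟩ : ∃ m, pvNeed p level = m + 1 := ⟨pvNeed p level - 1, by omega⟩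
    rw [hm]
    by_cases hshort : (p.length : Int) ≤ mx
    · rw [pvSplitA, pvSplitA, if_pos hshort, if_pos hshort]
    · by_cases hlev : pvSeps.length ≤ level
      · have hlt : mx < (p.length : Int) := by omega
        have hL : 4 ≤ level := by simpa [pvSeps] using hlev
        have hlen : mx.toNat < p.length := by omega
        have hchild : pvNeed (PySem.Chars.slice p (some mx) none) level ≤ m := by
          have := pv_slice_len p mx hmx
          unfold pvNeed at hm ⊢
          omega
        rw [pvSplitA, pvSplitA, if_neg hshort, if_neg hshort, if_pos hlev, if_pos hlev,
            if_pos hlt, if_pos hlt,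
            ih f' (by omega) _ _ (by omega),
            ih m (by omega) _ _ hchild]
      · rw [pvSplitA, pvSplitA, if_neg hshort, if_neg hshort, if_neg hlev, if_neg hlev]
        apply PySem.List.foldl_congr_mem
        intro acc part hmem
        by_cases hk : PySem.Chars.strip part = []
        · rw [if_pos hk, if_pos hk]
        · have hlev4 : level < 4 := by simpa [pvSeps] using hlev
          have hplen : part.length ≤ p.length := pv_splitOn_mem_len hmem
          have hchild : pvNeed part (level + 1) ≤ m := by
            unfold pvNeed at hm ⊢
            omega
          rw [if_neg hk, if_neg hk,
              ih f' (by omega) _ _ (by omega),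
              ih m (by omega) _ _ hchild]


-- the pipeline from level upward computes A's recursion at that level
theorem pv_main (mx mn : Int) (hmx : 1 ≤ mx) :
    ∀ (k level : Nat), level + k = 4 → ∀ (p : List Char) (f : Nat), pvNeed p level ≤ f →
    pvCollect mx mn ((pvSeps.drop level).foldl (fun its sep => pvStage mx mn sep its) [.inr p])
      = pvSplitA mx mn f p level := by
  intro k
  induction k with
  | zero =>
    intro level hlev p f hf
    obtain rfl : level = 4 := by omega
    have hdrop : pvSeps.drop 4 = [] := rfl
    rw [hdrop]
    have h1 : pvNeed p 4 = p.length + 1 := by simp [pvNeed]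
    calc pvCollect mx mn (List.foldl (fun its sep => pvStage mx mn sep its) [.inr p] [])
        = pvChop mx mn (p.length + 1) p := by simp [pvCollect]
      _ = pvChop mx mn f p := (pv_chop_stab mx mn hmx f p (by omega)).symm
      _ = pvSplitA mx mn f p 4 := pv_chop_eq mx mn 4 (by simp [pvSeps]) f p
  | succ k ih =>
    intro level hlev p f hf
    have hlev4 : level < 4 := by omega
    have hlevlen : level < pvSeps.length := by simpa [pvSeps] using hlev4
    have hdrop : pvSeps.drop level = pvSeps.getD level [] :: pvSeps.drop (level + 1) := by
      rw [List.drop_eq_getElem_cons hlevlen, List.getD_eq_getElem _ _ hlevlen]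
    have h1 : 1 ≤ pvNeed p level := by unfold pvNeed; omega
    obtain ⟨m, hm⟩ : ∃ m, f = m + 1 := ⟨f - 1, by omega⟩
    subst hm
    rw [hdrop, List.foldl_cons, pvSplitA]
    by_cases hshort : (p.length : Int) ≤ mx
    · rw [if_pos hshort]
      by_cases hmn : mn ≤ (p.length : Int)
      · rw [if_pos hmn]
        have hstep : pvStage mx mn (pvSeps.getD level []) [Sum.inr p]
            = [Sum.inl [("text", String.ofList (PySem.Chars.strip p)), ("chunk_type", "recursive")]] := by
          simp [pvStage, pvStep, if_pos hshort, if_pos hmn]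
        simp only [hstep]
        rw [pv_stages_final]
        simp [pvCollect]
      · rw [if_neg hmn]
        have hstep : pvStage mx mn (pvSeps.getD level []) [Sum.inr p] = [] := by
          simp [pvStage, pvStep, if_pos hshort, if_neg hmn]
        simp only [hstep]
        rw [pv_stages_nil]
        rfl
    · have hlevne : ¬ pvSeps.length ≤ level := by
        simp only [pvSeps]; simp; omega
      rw [if_neg hshort, if_neg hlevne]
      have hstep : pvStage mx mn (pvSeps.getD level []) [Sum.inr p]
          = (PySem.Chars.splitOn p (pvSeps.getD level [])).filterMap
              (fun part => if PySem.Chars.strip part = [] then none else some (.inr part)) := by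
        simp [pvStage, pvStep, if_neg hshort]
      simp only [hstep]
      -- align the fuel of every recursive call on the RHS
      rw [PySem.List.foldl_congr_mem _ _
          (fun acc part => acc ++ (if PySem.Chars.strip part = [] then []
            else pvSplitA mx mn (pvNeed part (level+1)) part (level+1))) _
          (by
            intro acc part hmem
            by_cases hk : PySem.Chars.strip part = []
            · simp [hk]
            · have hplen : part.length ≤ p.length := pv_splitOn_mem_len hmem
              have hneed : pvNeed part (level + 1) ≤ m := by
                unfold pvNeed at hf ⊢
                have h2 : min level 4 = level := by omega
                have h3 : min (level + 1) 4 = level + 1 := by omega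
                rw [h2] at hf; rw [h3]
                omega
              have := pv_stab mx mn hmx m part (level + 1) hneed
              simp [hk, this])]
      rw [PySem.List.foldl_append_eq_flatMap, pv_stages_flat]
      have hIH : ∀ part : List Char,
          pvCollect mx mn ((pvSeps.drop (level+1)).foldl (fun its sep => pvStage mx mn sep its) [Sum.inr part])
            = pvSplitA mx mn (pvNeed part (level+1)) part (level+1) :=
        fun part => ih (level+1) (by omega) part _ (le_refl _)
      generalize PySem.Chars.splitOn p (pvSeps.getD level []) = parts
      induction parts with
      | nil => rfl
      | cons q qs ihq =>
        by_cases hk : PySem.Chars.strip q = []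
        · simpa [List.filterMap_cons, hk] using ihq
        · simp only [List.filterMap_cons, if_neg hk, List.flatMap_cons, pv_collect_append,
            List.flatMap_cons]
          rw [ihq, hIH q]
          simp

-- ===== VERDICT (by name: the statement is the Claim_ definition above) =====
theorem recursive_chunking_spec : Claim_equal_recursive_chunking := by
  intro text mx mn _ hpre
  unfold Spec_recursive_chunking recursive_chunking recursive_chunking_alt
  have := pv_main mx mn hpre 4 0 rfl text.toList (text.toList.length + 5) (by simp [pvNeed])
  simpa using this.symm
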